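-- pv_equiv track=rewrite | github.com/critanaro/eatRiceBot | app.py | print_menu
-- ===== SOURCE A (Python) =====
-- def menu_options(servery, dining_data):
--     options = []
--     for row in dining_data:
--         if row[0].lower() == servery:
--             if row[2]:
--                 options.append(row[2].strip('\"'))
--
--     return options
--
-- def print_menu(servery, dining_data):
--     menu = menu_options(servery, dining_data)
--     menu_text = ""
--     if len(menu) > 0:
--         menu_text += servery.capitalize() + " is serving "
--         for m in range(len(menu)):
--             menu_text += menu[m]
--             if m < len(menu) - 2:
--                 menu_text += ", "
--             elif m == len(menu) - 2:
--                 menu_text += " and "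
--     return menu_text
-- ===== SOURCE B (Python) =====
-- def print_menu(servery, dining_data):
--     # Single backward pass: build the sentence body back-to-front,
--     # choosing the separator from how many items were already placed.
--     body = ""
--     seen = 0
--     for row in reversed(dining_data):
--         if row[0].lower() == servery and row[2]:
--             item = row[2].strip('"')
--             if seen == 0:
--                 body = item
--             elif seen == 1:
--                 body = item + " and " + body
--             else:
--                 body = item + ", " + body
--             seen += 1
--     if seen == 0:
--         return ""
--     return servery.capitalize() + " is serving " + body
-- ===== Notes on version B (the rewrite author's own statement) =====
-- stated objective: alternative
-- what changed: B makes a single backward pass over the rows with no intermediate item list: iterating reversed(dining_data) it builds the sentence body back-to-front, picking each separator (none / ' and ' / ', ') from a count of items already placed, instead of A's two stages (collect a list, then a forward index loop comparing each index with len-2).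
import Mathlib
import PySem

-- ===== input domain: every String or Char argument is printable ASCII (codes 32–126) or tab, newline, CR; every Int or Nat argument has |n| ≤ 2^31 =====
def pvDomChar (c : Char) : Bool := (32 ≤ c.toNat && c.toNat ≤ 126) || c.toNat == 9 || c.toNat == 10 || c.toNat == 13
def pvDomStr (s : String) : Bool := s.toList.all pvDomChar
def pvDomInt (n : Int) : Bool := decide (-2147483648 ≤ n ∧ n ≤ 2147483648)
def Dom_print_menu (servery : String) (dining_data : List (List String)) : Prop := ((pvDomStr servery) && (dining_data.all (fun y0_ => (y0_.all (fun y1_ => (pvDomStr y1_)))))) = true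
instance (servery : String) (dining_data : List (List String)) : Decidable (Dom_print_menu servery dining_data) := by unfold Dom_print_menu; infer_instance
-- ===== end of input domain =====

-- B replaces A's two stages (collect an item list, then a forward index loop choosing separators
-- by comparing the index with len-2) by ONE backward pass over the rows that builds the sentence
-- body back-to-front with a counter of items already placed; objective: alternative, not faster.

-- shared helper: Python's str.capitalize() — first char uppercased, rest lowercased (exact on the ASCII domain Dom_)
def pyCapitalize (s : String) : String :=
  match s.toList with
  | [] => ""
  | c :: t => String.ofList (PySem.Chars.upperChar c :: PySem.Chars.lower t)

-- ===== PORT A =====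
def menu_options (servery : String) (dining_data : List (List String)) : List String :=
  dining_data.foldl
    (fun options row =>
      if PySem.Str.lower (PySem.List.pyGetD row 0 "") = servery then
        if PySem.List.pyGetD row 2 "" ≠ "" then
          options ++ [PySem.Str.stripChars (PySem.List.pyGetD row 2 "") "\""]
        else options
      else options)
    []

def print_menu (servery : String) (dining_data : List (List String)) : String :=
  let menu := menu_options servery dining_data
  let menu_text : String := ""
  if 0 < PySem.List.len menu then
    let menu_text := menu_text ++ pyCapitalize servery ++ " is serving "
    (PySem.List.pyRange 0 (PySem.List.len menu) 1).foldl
      (fun menu_text m =>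
        let menu_text := menu_text ++ PySem.List.pyGetD menu m ""
        if m < PySem.List.len menu - 2 then menu_text ++ ", "
        else if m = PySem.List.len menu - 2 then menu_text ++ " and "
        else menu_text)
      menu_text
  else menu_text

-- ===== PORT B =====
-- single backward pass over the rows, state = (body so far, items placed)
def print_menu_alt (servery : String) (dining_data : List (List String)) : String :=
  let st :=
    dining_data.reverse.foldl
      (fun (st : String × Int) row =>
        if PySem.Str.lower (PySem.List.pyGetD row 0 "") = servery ∧ PySem.List.pyGetD row 2 "" ≠ "" then
          let item := PySem.Str.stripChars (PySem.List.pyGetD row 2 "") "\""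
          let body :=
            if st.2 = 0 then item
            else if st.2 = 1 then item ++ " and " ++ st.1
            else item ++ ", " ++ st.1
          (body, st.2 + 1)
        else st)
      ("", 0)
  if st.2 = 0 then ""
  else pyCapitalize servery ++ " is serving " ++ st.1

-- ===== PRECONDITION & SPEC =====
-- Pre_ excludes exactly the inputs where Python A raises IndexError: an empty row (row[0]),
-- or a row matching the servery with fewer than 3 entries (row[2]).
def Pre_print_menu (servery : String) (dining_data : List (List String)) : Prop :=
  ∀ row ∈ dining_data, row ≠ [] ∧ (PySem.Str.lower (row.headD "") = servery → 3 ≤ row.length)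
instance (servery : String) (dining_data : List (List String)) : Decidable (Pre_print_menu servery dining_data) := by unfold Pre_print_menu; infer_instance

def pvWitness_print_menu : String × List (List String) :=
  ("south", [["South", "a", "\"Tacos\""], ["North", "b", "Soup"], ["south", "c", "Rice"]])

def Spec_print_menu (servery : String) (dining_data : List (List String)) (out : String) : Prop := out = print_menu_alt servery dining_data
instance (servery : String) (dining_data : List (List String)) (out : String) : Decidable (Spec_print_menu servery dining_data out) := by unfold Spec_print_menu; infer_instance

-- ===== CLAIM (what is proved, stated in full; the proofs are below) =====
def Claim_equal_print_menu : Prop := ∀ (servery : String) (dining_data : List (List String)), Dom_print_menu servery dining_data → Pre_print_menu servery dining_data → Spec_print_menu servery dining_data (print_menu servery dining_data)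

-- ===== LEMMAS AND PROOFS =====

-- the common sentence body, characterised structurally
def joinA : List String → String
  | [] => ""
  | [x] => x
  | x :: y :: t => x ++ (if t = [] then " and " else ", ") ++ joinA (y :: t)

-- the row filter both programs apply
def rowItem (servery : String) (row : List String) : Option String :=
  if PySem.Str.lower (PySem.List.pyGetD row 0 "") = servery ∧ PySem.List.pyGetD row 2 "" ≠ "" then
    some (PySem.Str.stripChars (PySem.List.pyGetD row 2 "") "\"")
  else none

-- A's accumulator loop over rows collects exactly the filtered items.
theorem menu_options_eq (servery : String) (dining_data : List (List String)) :
    menu_options servery dining_data = dining_data.filterMap (rowItem servery) := by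
  unfold menu_options
  suffices h : ∀ acc : List String,
      dining_data.foldl
        (fun options row =>
          if PySem.Str.lower (PySem.List.pyGetD row 0 "") = servery then
            if PySem.List.pyGetD row 2 "" ≠ "" then
              options ++ [PySem.Str.stripChars (PySem.List.pyGetD row 2 "") "\""]
            else options
          else options) acc
      = acc ++ dining_data.filterMap (rowItem servery) by
    simpa using h []
  induction dining_data with
  | nil => intro acc; simp
  | cons r rs ih =>
    intro acc
    simp only [List.foldl_cons, List.filterMap_cons, rowItem]
    split_ifs with h1 h2 h3 h4 <;> simp_all [rowItem]

def sepA (m n : Int) : String :=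
  if m < n - 2 then ", " else if m = n - 2 then " and " else ""

-- A's index loop, read off the enumerated list
theorem enumFold (xs : List String) : ∀ (s n : Int) (acc : String), n = s + xs.length →
    (PySem.List.enumerate xs s).foldl (fun a p => a ++ p.2 ++ sepA p.1 n) acc = acc ++ joinA xs := by
  induction xs with
  | nil => intro s n acc _; simp [PySem.List.enumerate, joinA]
  | cons x xs' ih =>
    intro s n acc h
    rw [PySem.List.enumerate_cons, List.foldl_cons]
    rw [ih (s + 1) n _ (by simp at h ⊢; omega)]
    cases xs' with
    | nil =>
      have h1 : ¬ (s < n - 2) := by simp at h; omega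
      have h2 : ¬ (s = n - 2) := by simp at h; omega
      simp [joinA, sepA, h1, h2]
    | cons y t =>
      cases t with
      | nil =>
        have h2 : s = n - 2 := by simp at h; omega
        have h1 : ¬ (s < n - 2) := by omega
        simp [joinA, sepA, h2, String.append_assoc]
      | cons z t' =>
        have h1 : s < n - 2 := by simp at h; omega
        simp [joinA, sepA, h1, String.append_assoc]

theorem rangeFold (menu : List String) (init : String) :
    (PySem.List.pyRange 0 (PySem.List.len menu) 1).foldl
      (fun menu_text m =>
        let menu_text := menu_text ++ PySem.List.pyGetD menu m ""
        if m < PySem.List.len menu - 2 then menu_text ++ ", "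
        else if m = PySem.List.len menu - 2 then menu_text ++ " and "
        else menu_text)
      init = init ++ joinA menu := by
  calc (PySem.List.pyRange 0 (PySem.List.len menu) 1).foldl
        (fun menu_text m =>
          let menu_text := menu_text ++ PySem.List.pyGetD menu m ""
          if m < PySem.List.len menu - 2 then menu_text ++ ", "
          else if m = PySem.List.len menu - 2 then menu_text ++ " and "
          else menu_text)
        init
      = List.foldl (fun (a : String) (p : Int × String) => a ++ p.2 ++ sepA p.1 (PySem.List.len menu))
          init ((PySem.List.pyRange 0 (PySem.List.len menu) 1).map
            (fun j => (j, PySem.List.pyGetD menu j ""))) := by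
        rw [List.foldl_map]
        congr 1
        funext a m
        simp only [sepA]
        split_ifs <;> simp [String.append_assoc]
    _ = List.foldl (fun (a : String) (p : Int × String) => a ++ p.2 ++ sepA p.1 (PySem.List.len menu))
          init (PySem.List.enumerate menu 0) := by
        rw [PySem.List.enumerate_eq_map_pyRange menu ""]
    _ = init ++ joinA menu := enumFold menu 0 _ init (by simp [PySem.List.len])

-- B's backward step, on an already-filtered item
def bstep (st : String × Int) (item : String) : String × Int :=
  (if st.2 = 0 then item
   else if st.2 = 1 then item ++ " and " ++ st.1
   else item ++ ", " ++ st.1, st.2 + 1)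

-- B's backward pass over rows equals the backward pass over the filtered items.
theorem rows_to_items (servery : String) (dining_data : List (List String)) (st : String × Int) :
    dining_data.reverse.foldl
      (fun (st : String × Int) row =>
        if PySem.Str.lower (PySem.List.pyGetD row 0 "") = servery ∧ PySem.List.pyGetD row 2 "" ≠ "" then
          let item := PySem.Str.stripChars (PySem.List.pyGetD row 2 "") "\""
          let body :=
            if st.2 = 0 then item
            else if st.2 = 1 then item ++ " and " ++ st.1
            else item ++ ", " ++ st.1
          (body, st.2 + 1)
        else st)
      st
    = (dining_data.filterMap (rowItem servery)).reverse.foldl bstep st := by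
  rw [List.foldl_reverse, List.foldl_reverse]
  induction dining_data generalizing st with
  | nil => simp
  | cons r rs ih =>
    by_cases h : PySem.Str.lower (PySem.List.pyGetD r 0 "") = servery ∧ PySem.List.pyGetD r 2 "" ≠ ""
    · simp only [List.filterMap_cons, rowItem, if_pos h, List.foldr_cons, ih, bstep]
    · simp only [List.filterMap_cons, rowItem, if_neg h, List.foldr_cons, ih]

-- the backward pass over the items produces exactly the sentence body and the item count
theorem items_backward (L : List String) :
    L.reverse.foldl bstep ("", 0) = (joinA L, (L.length : Int)) := by
  rw [List.foldl_reverse]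
  induction L with
  | nil => simp [joinA]
  | cons x t ih =>
    rw [List.foldr_cons, ih]
    cases t with
    | nil => simp [bstep, joinA]
    | cons y t' =>
      cases t' with
      | nil => simp [bstep, joinA]
      | cons z t'' =>
        simp only [bstep, joinA, List.length_cons]
        push_cast
        rw [if_neg (by omega), if_neg (by omega)]

-- ===== VERDICT (by name: the statement is the Claim_ definition above) =====
theorem print_menu_spec : Claim_equal_print_menu := by
  intro servery dining_data _ _
  unfold Spec_print_menu print_menu print_menu_alt
  rw [menu_options_eq, rows_to_items, items_backward]
  cases h : dining_data.filterMap (rowItem servery) with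
  | nil => simp [PySem.List.len]
  | cons x xs =>
    have hpos : (0 : Int) < PySem.List.len (x :: xs) := by simp [PySem.List.len]
    rw [if_pos hpos, rangeFold]
    have hne : ((x :: xs).length : Int) ≠ 0 := by exact_mod_cast (by simp : (x :: xs).length ≠ 0)
    rw [if_neg hne]
    simp
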